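-- pv_equiv track=rewrite | github.com/Blekitny1/PythonLeetcode | leetcode/leetcode1smallernumbersinarray.py | count_smaller_nums
-- ===== SOURCE A (Python) =====
-- def count_smaller_nums(nums: list[int]) -> list[int]:
--     n = len(nums)
--     result = []
--     for i in range(n):
--         counter = 0
--         for j in range(n):
--             if i!= j and nums[i] > nums[j]:
--                 counter += 1
--         result.append(counter)
--     return result
-- ===== SOURCE B (Python) =====
-- def count_smaller_nums(nums: list[int]) -> list[int]:
--     first = {}
--     for i, v in enumerate(sorted(nums)):
--         if v not in first:
--             first[v] = i
--     return [first[v] for v in nums]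
-- ===== Notes on version B (the rewrite author's own statement) =====
-- stated objective: faster
-- what changed: Replaces the quadratic nested index scan by sort-then-first-occurrence-index: sorted(nums) is built once, a dict maps each value to the index of its first occurrence in the sorted list (= number of strictly smaller elements), and the answer is a lookup per element.
import Mathlib
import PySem

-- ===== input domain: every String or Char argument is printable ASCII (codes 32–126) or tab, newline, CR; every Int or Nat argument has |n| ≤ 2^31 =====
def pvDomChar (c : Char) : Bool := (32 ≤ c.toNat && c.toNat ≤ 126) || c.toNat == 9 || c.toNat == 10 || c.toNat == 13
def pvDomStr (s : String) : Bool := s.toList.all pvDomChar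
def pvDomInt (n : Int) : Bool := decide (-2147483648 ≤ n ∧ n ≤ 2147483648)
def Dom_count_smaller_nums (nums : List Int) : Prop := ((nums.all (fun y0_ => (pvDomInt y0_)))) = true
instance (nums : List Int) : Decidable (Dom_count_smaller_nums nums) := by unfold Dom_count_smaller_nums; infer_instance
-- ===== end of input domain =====

-- B replaces A's O(n^2) nested index scan by sort-then-first-occurrence-index lookups (O(n log n)); objective: faster.

-- ===== PORT A =====
def count_smaller_nums (nums : List Int) : List Int :=
  let n : Int := nums.length
  (PySem.List.pyRange 0 n 1).foldl
    (fun result i =>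
      result ++
        [(PySem.List.pyRange 0 n 1).foldl
          (fun counter j =>
            if i ≠ j ∧ PySem.List.pyGetD nums i 0 > PySem.List.pyGetD nums j 0 then counter + 1
            else counter)
          0])
    []

-- ===== PORT B =====
def count_smaller_nums_alt (nums : List Int) : List Int :=
  let s := PySem.List.sorted nums (fun x => x) false
  let first : PySem.Dict Int Int :=
    (PySem.List.enumerate s 0).foldl
      (fun d p => if d.contains p.2 then d else d.insert p.2 p.1) PySem.Dict.empty
  -- first[v]: the key is always present (every v ∈ nums occurs in s), so getD with default 0 is exact
  nums.map (fun v => first.getD v 0)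

-- ===== PRECONDITION & SPEC =====
def Spec_count_smaller_nums (nums : List Int) (out : List Int) : Prop := out = count_smaller_nums_alt nums
instance (nums : List Int) (out : List Int) : Decidable (Spec_count_smaller_nums nums out) := by unfold Spec_count_smaller_nums; infer_instance

-- ===== CLAIM (what is proved, stated in full; the proofs are below) =====
def Claim_equal_count_smaller_nums : Prop := ∀ (nums : List Int), Dom_count_smaller_nums nums → Spec_count_smaller_nums nums (count_smaller_nums nums)

-- ===== LEMMAS AND PROOFS =====

-- A's inner loop over j counts the elements of nums strictly smaller than nums[i]
lemma inner_loop_eq (nums : List Int) (i : Int) :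
    (PySem.List.pyRange 0 (nums.length : Int) 1).foldl
      (fun counter j =>
        if i ≠ j ∧ PySem.List.pyGetD nums i 0 > PySem.List.pyGetD nums j 0 then counter + 1
        else counter) 0
    = (nums.countP (fun y => decide (y < PySem.List.pyGetD nums i 0)) : Int) := by
  have hfun : (fun (counter : Int) j =>
        if i ≠ j ∧ PySem.List.pyGetD nums i 0 > PySem.List.pyGetD nums j 0 then counter + 1
        else counter)
      = fun (counter : Int) j =>
        (fun (c : Int) (y : Int) => if decide (y < PySem.List.pyGetD nums i 0) then c + 1 else c)
          counter (PySem.List.pyGetD nums j 0) := by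
    funext c j
    by_cases hij : i = j
    · subst hij; simp
    · simp [hij, GT.gt]
  rw [hfun, PySem.List.foldl_pyRange_zero_pyGetD' nums 0
        (fun (c : Int) (y : Int) => if decide (y < PySem.List.pyGetD nums i 0) then c + 1 else c) 0,
      PySem.List.foldl_count_if]
  simp

-- A returns, for each element x of nums, the number of elements of nums strictly smaller than x
lemma portA_eq_map_countP (nums : List Int) :
    count_smaller_nums nums
      = nums.map (fun x => (nums.countP (fun y => decide (y < x)) : Int)) := by
  unfold count_smaller_nums
  rw [PySem.List.foldl_append_singleton_eq_map]
  simp only [inner_loop_eq]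
  rw [show (fun i => (nums.countP (fun y => decide (y < PySem.List.pyGetD nums i 0)) : Int))
        = (fun x => (nums.countP (fun y => decide (y < x)) : Int)) ∘
            (fun j => PySem.List.pyGetD nums j 0) from rfl,
      ← List.map_map, PySem.List.map_pyGetD_pyRange_zero']
  simp

-- B's dict loop: the final lookup of v is (the start index plus) v's first-occurrence index in s
lemma loop_get? (s : List Int) : ∀ (k : Int) (d : PySem.Dict Int Int) (v : Int),
    ((PySem.List.enumerate s k).foldl
        (fun d p => if d.contains p.2 then d else d.insert p.2 p.1) d).get? v
      = if d.contains v then d.get? v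
        else (PySem.List.index? s v).map (fun j => k + (j : Int)) := by
  induction s with
  | nil =>
      intro k d v
      simp [PySem.List.enumerate, PySem.List.index?]
      intro h
      exact (PySem.Dict.get?_eq_none_iff_contains d v).mpr (by simp [h])
  | cons a t ih =>
      intro k d v
      rw [PySem.List.enumerate_cons]
      simp only [List.foldl_cons]
      by_cases hv : a = v
      · subst hv
        by_cases hc : d.contains a
        · simp only [hc, if_true]
          rw [ih (k + 1) d a]
          simp [hc]
        · simp only [hc, if_false, Bool.false_eq_true]
          rw [ih (k + 1) (d.insert a k) a, PySem.List.index?_cons_self]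
          simp [PySem.Dict.contains_insert_self, PySem.Dict.get?_insert_self]
      · have hv' : ¬ v = a := fun h => hv h.symm
        have hd' : (if d.contains v then d.get? v
              else (PySem.List.index? (a :: t) v).map (fun j => k + (j : Int)))
            = (if d.contains v then d.get? v
              else (PySem.List.index? t v).map (fun j => (k + 1) + (j : Int))) := by
          by_cases hc : d.contains v
          · simp [hc]
          · rw [PySem.List.index?_cons_of_ne t hv]
            simp only [hc, if_false, Bool.false_eq_true]
            cases PySem.List.index? t v with
            | none => rfl
            | some j => simp; ring
        rw [hd']
        by_cases hc : d.contains a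
        · simp only [hc, if_true]
          exact ih (k + 1) d v
        · simp only [hc, if_false, Bool.false_eq_true]
          rw [ih (k + 1) (d.insert a k) v]
          have h1 : (d.insert a k).contains v = d.contains v := by
            simp [PySem.Dict.contains_insert, hv']
          have h2 : (d.insert a k).get? v = d.get? v :=
            PySem.Dict.get?_insert_of_ne d k hv'
          rw [h1, h2]

-- in a ≤-sorted list, the first-occurrence index of a member v counts the elements < v
lemma index?_sorted_eq_countP (s : List Int) (hs : s.Pairwise (· ≤ ·)) (v : Int) (hv : v ∈ s) :
    PySem.List.index? s v = some (s.countP (fun y => decide (y < v))) := by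
  induction s with
  | nil => cases hv
  | cons a t ih =>
      rcases List.pairwise_cons.mp hs with ⟨ha, ht⟩
      by_cases hav : a = v
      · subst hav
        rw [PySem.List.index?_cons_self]
        have hz : t.countP (fun y => decide (y < a)) = 0 :=
          List.countP_eq_zero.mpr (fun y hy => by simpa using not_lt.mpr (ha y hy))
        simp [hz]
      · have hvt : v ∈ t := by cases hv with
          | head => exact absurd rfl hav
          | tail _ h => exact h
        have hav' : a < v := lt_of_le_of_ne (ha v hvt) hav
        rw [PySem.List.index?_cons_of_ne t hav, ih ht hvt]
        simp [hav']

lemma portB_eq_map_countP (nums : List Int) :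
    count_smaller_nums_alt nums
      = nums.map (fun x => (nums.countP (fun y => decide (y < x)) : Int)) := by
  unfold count_smaller_nums_alt
  apply List.map_congr_left
  intro v hv
  set s := PySem.List.sorted nums (fun x => x) false with hsdef
  have hvs : v ∈ s := (PySem.List.mem_sorted nums (fun x => x) false v).mpr hv
  have hsp : s.Pairwise (· ≤ ·) := PySem.List.sorted_pairwise nums (fun x => x)
  rw [PySem.Dict.getD_eq_get?_getD, loop_get? s 0 PySem.Dict.empty v]
  rw [index?_sorted_eq_countP s hsp v hvs]
  have hperm : s.Perm nums := PySem.List.sorted_perm nums (fun x => x) false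
  simp [PySem.Dict.contains_empty, hperm.countP_eq]

-- ===== VERDICT (by name: the statement is the Claim_ definition above) =====
theorem count_smaller_nums_spec : Claim_equal_count_smaller_nums := by
  intro nums _
  unfold Spec_count_smaller_nums
  rw [portA_eq_map_countP, portB_eq_map_countP]
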